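-- pv_equiv track=rewrite | github.com/pedroailton/flyfood-pisi-2 | flyfood/otimizador.py | calcularCustoTotalDaRota
-- ===== SOURCE A (Python) =====
-- def calcularDistancia(ponto_a, ponto_b):
--     """
--     Calcula a distância de Manhattan entre dois pontos em uma grade.
--     ponto_a e b são tuplas com as posições dos 2 pontos"""
--
--     # Desempacota as tuplas
--     linha1, coluna1 = ponto_a
--     linha2, coluna2 = ponto_b
--
--     # Calcula a distância de Manhattan: |x2 - x1| + |y2 - y1|
--     distancia = abs(linha2 - linha1) + abs(coluna2 - coluna1)
--
--     #retorna distancia de a e b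
--     return distancia
--
-- def calcularCustoTotalDaRota(rota, pontos):
--     """
--     Calcula o custo total de uma rota específica, começando e terminando no ponto 'R'.
--     rota é uma tupla com os pontos da rota, ex: A, B, C, D
--     pontos é um dicionário que mapeia o nome de cada ponto às suas coordenadas, ex: R: (3, 0), A: (1, 1)...
--     """
--
--     # Ponto de origem e retorno
--     ponto_r = pontos['R']
--     custo_total = 0
--
--     # 1. Calcula o custo da origem 'R' até o primeiro ponto da rota
--     primeiro_ponto = pontos[rota[0]]
--     custo_total += calcularDistancia(ponto_r, primeiro_ponto)
--
--     # 2. Calcula o custo entre os pontos intermediários da rota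
--     # O loop vai do primeiro ponto até o penúltimo
--     for i in range(len(rota) - 1):
--         ponto_atual = pontos[rota[i]]
--         proximo_ponto = pontos[rota[i+1]]
--         custo_total += calcularDistancia(ponto_atual, proximo_ponto)
--
--     # 3. Calcula o custo do último ponto da rota de volta para a origem 'R'
--     ultimo_ponto = pontos[rota[-1]]
--     custo_total += calcularDistancia(ultimo_ponto, ponto_r)
--
--     return custo_total
-- ===== SOURCE B (Python) =====
-- def _somaEixo(valores):
--     # Recursively sums absolute differences of consecutive values of one axis.
--     if len(valores) < 2:
--         return 0
--     return abs(valores[1] - valores[0]) + _somaEixo(valores[1:])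
--
-- def calcularCustoTotalDaRota(rota, pontos):
--     # The Manhattan metric is separable per axis, so the cycle cost is the sum of
--     # the per-axis costs: build the closed tour R -> route -> R once, project it
--     # onto rows and onto columns, and sum each axis's consecutive differences
--     # recursively.
--     ciclo = [pontos['R']] + [pontos[nome] for nome in rota] + [pontos['R']]
--     linhas = [p[0] for p in ciclo]
--     colunas = [p[1] for p in ciclo]
--     return _somaEixo(linhas) + _somaEixo(colunas)
-- ===== Notes on version B (the rewrite author's own statement) =====
-- stated objective: alternative
-- what changed: Exploits the per-axis separability of the Manhattan metric: instead of A's three-case index loop summing point-to-point distances, B builds the closed tour once, projects it onto the row axis and the column axis, and sums each axis's consecutive absolute differences with a recursive helper.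
-- crash fix: On an empty rota (with 'R' present in pontos) A raises IndexError at rota[0]; B returns 0, the cost of the trivial cycle R->R. — e.g. on calcularCustoTotalDaRota([], [("R", (3, 0))]): A raises IndexError, B returns 0
import Mathlib
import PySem

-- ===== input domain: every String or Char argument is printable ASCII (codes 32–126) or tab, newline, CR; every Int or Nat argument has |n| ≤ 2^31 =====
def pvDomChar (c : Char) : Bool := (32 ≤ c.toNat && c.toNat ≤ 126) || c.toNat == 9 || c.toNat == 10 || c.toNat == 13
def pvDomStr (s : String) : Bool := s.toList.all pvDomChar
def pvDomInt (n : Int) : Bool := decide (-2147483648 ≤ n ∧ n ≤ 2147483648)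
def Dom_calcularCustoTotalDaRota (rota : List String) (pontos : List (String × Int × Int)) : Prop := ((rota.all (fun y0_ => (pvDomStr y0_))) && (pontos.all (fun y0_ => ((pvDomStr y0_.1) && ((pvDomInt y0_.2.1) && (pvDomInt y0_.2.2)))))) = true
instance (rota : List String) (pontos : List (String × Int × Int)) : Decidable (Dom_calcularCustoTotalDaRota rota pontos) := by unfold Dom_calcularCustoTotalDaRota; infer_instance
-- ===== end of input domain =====

-- B uses the per-axis separability of the Manhattan metric: it builds the closed
-- tour once, projects it onto rows and columns, and sums each axis's consecutive
-- absolute differences recursively (objective: alternative).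

-- ===== PORT A =====
def calcularDistancia (ponto_a ponto_b : Int × Int) : Int :=
  |ponto_b.1 - ponto_a.1| + |ponto_b.2 - ponto_a.2|

def calcularCustoTotalDaRota (rota : List String) (pontos : List (String × Int × Int)) : Int :=
  let d := PySem.Dict.mk pontos
  -- dict lookups are guarded with a default so the port is total; Pre_ rules the misses out
  let ponto_r := (d.get? "R").getD (0, 0)
  let custo0 : Int := 0
  let primeiro := (d.get? (PySem.List.pyGetD rota 0 "")).getD (0, 0)
  let custo1 := custo0 + calcularDistancia ponto_r primeiro
  let custo2 := (PySem.List.pyRange 0 ((rota.length : Int) - 1) 1).foldl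
    (fun c i =>
      c + calcularDistancia ((d.get? (PySem.List.pyGetD rota i "")).getD (0, 0))
            ((d.get? (PySem.List.pyGetD rota (i + 1) "")).getD (0, 0))) custo1
  let ultimo := (d.get? (PySem.List.pyGetD rota (-1) "")).getD (0, 0)
  custo2 + calcularDistancia ultimo ponto_r

-- ===== PORT B =====
-- recursive helper _somaEixo: sum of |v[i+1]-v[i]| over one axis's value list
def somaEixo : List Int → Int
  | a :: b :: t => |b - a| + somaEixo (b :: t)
  | _ => 0

def calcularCustoTotalDaRota_alt (rota : List String) (pontos : List (String × Int × Int)) : Int :=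
  let d := PySem.Dict.mk pontos
  let r := (d.get? "R").getD (0, 0)
  let ciclo := [r] ++ rota.map (fun nome => (d.get? nome).getD (0, 0)) ++ [r]
  let linhas := ciclo.map (fun p => p.1)
  let colunas := ciclo.map (fun p => p.2)
  somaEixo linhas + somaEixo colunas

-- ===== PRECONDITION & SPEC =====
-- Pre_ excludes exactly the inputs where Python A raises: an empty rota (IndexError
-- at rota[0]) or a name ('R' or a route stop) missing from pontos (KeyError).
def Pre_calcularCustoTotalDaRota (rota : List String) (pontos : List (String × Int × Int)) : Prop :=
  rota ≠ [] ∧ (pontos.any (fun p => p.1 == "R")) = true ∧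
    (rota.all (fun s => pontos.any (fun p => p.1 == s))) = true
instance (rota : List String) (pontos : List (String × Int × Int)) : Decidable (Pre_calcularCustoTotalDaRota rota pontos) := by unfold Pre_calcularCustoTotalDaRota; infer_instance
def pvWitness_calcularCustoTotalDaRota : List String × (List (String × Int × Int)) :=
  (["A"], [("R", (0, 0)), ("A", (1, 2))])

-- On an empty rota (with 'R' present in pontos) A raises IndexError at rota[0];
-- B returns 0, the cost of the trivial cycle R -> R.
def Raises_calcularCustoTotalDaRota (rota : List String) (pontos : List (String × Int × Int)) : Prop :=
  rota = [] ∧ (pontos.any (fun p => p.1 == "R")) = true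
instance (rota : List String) (pontos : List (String × Int × Int)) : Decidable (Raises_calcularCustoTotalDaRota rota pontos) := by unfold Raises_calcularCustoTotalDaRota; infer_instance
def pvRaiseWitness_calcularCustoTotalDaRota : List String × (List (String × Int × Int)) :=
  ([], [("R", (3, 0))])
def pvRaiseWitnessOut_calcularCustoTotalDaRota : Int := 0

def Spec_calcularCustoTotalDaRota (rota : List String) (pontos : List (String × Int × Int)) (out : Int) : Prop := out = calcularCustoTotalDaRota_alt rota pontos
instance (rota : List String) (pontos : List (String × Int × Int)) (out : Int) : Decidable (Spec_calcularCustoTotalDaRota rota pontos out) := by unfold Spec_calcularCustoTotalDaRota; infer_instance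

-- ===== CLAIM (what is proved, stated in full; the proofs are below) =====
def Claim_equal_calcularCustoTotalDaRota : Prop := ∀ (rota : List String) (pontos : List (String × Int × Int)), Dom_calcularCustoTotalDaRota rota pontos → Pre_calcularCustoTotalDaRota rota pontos → Spec_calcularCustoTotalDaRota rota pontos (calcularCustoTotalDaRota rota pontos)
def Claim_raises_calcularCustoTotalDaRota : Prop := (∀ (rota : List String) (pontos : List (String × Int × Int)), Dom_calcularCustoTotalDaRota rota pontos → Raises_calcularCustoTotalDaRota rota pontos → ¬ Pre_calcularCustoTotalDaRota rota pontos) ∧ (Dom_calcularCustoTotalDaRota (pvRaiseWitness_calcularCustoTotalDaRota.1) (pvRaiseWitness_calcularCustoTotalDaRota.2) ∧ Raises_calcularCustoTotalDaRota (pvRaiseWitness_calcularCustoTotalDaRota.1) (pvRaiseWitness_calcularCustoTotalDaRota.2) ∧ calcularCustoTotalDaRota_alt (pvRaiseWitness_calcularCustoTotalDaRota.1) (pvRaiseWitness_calcularCustoTotalDaRota.2) = pvRaiseWitnessOut_calcularCustoTotalDaRota)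

-- ===== LEMMAS AND PROOFS =====

-- sum of consecutive-pair distances of a list (bridge between the two ports)
def pvPairSum : List (Int × Int) → Int
  | a :: b :: t => calcularDistancia a b + pvPairSum (b :: t)
  | _ => 0

-- B's axis decomposition equals the pairwise distance sum
lemma pvSplit : ∀ (l : List (Int × Int)),
    somaEixo (l.map (fun p => p.1)) + somaEixo (l.map (fun p => p.2)) = pvPairSum l := by
  intro l
  induction l with
  | nil => rfl
  | cons a t ih =>
    cases t with
    | nil => rfl
    | cons b t' =>
      simp only [List.map_cons, somaEixo, pvPairSum, calcularDistancia] at ih ⊢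
      omega

lemma pvGetD_map {α β : Type} (f : α → β) (d : α) :
    ∀ (l : List α) (k : Nat), (l.map f).getD k (f d) = f (l.getD k d) := by
  intro l
  induction l with
  | nil => intro k; rfl
  | cons a t ih => intro k; cases k with
    | zero => rfl
    | succ k => simp only [List.map_cons, List.getD_cons_succ]; exact ih k

lemma pvGetLast_map {α β : Type} (f : α → β) :
    ∀ (l : List α) (h : l ≠ []) (h' : l.map f ≠ []), (l.map f).getLast h' = f (l.getLast h) := by
  intro l
  induction l with
  | nil => intro h; exact absurd rfl h
  | cons a t ih =>
    intro h h'
    cases t with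
    | nil => rfl
    | cons b t' =>
      have hih := ih (by simp) (by simp)
      simp only [List.map_cons] at hih ⊢
      rw [List.getLast_cons (show b :: t' ≠ [] by simp)]
      exact hih

lemma pvLoop (z : Int × Int) :
    ∀ (cs : List (Int × Int)) (x : Int × Int) (acc : Int),
      (List.range cs.length).foldl
        (fun c k => c + calcularDistancia ((x :: cs).getD k z) ((x :: cs).getD (k + 1) z)) acc
      = acc + pvPairSum (x :: cs) := by
  intro cs
  induction cs with
  | nil => intro x acc; simp [pvPairSum]
  | cons y t ih =>
    intro x acc
    rw [List.length_cons, List.range_succ_eq_map, List.foldl_cons, List.foldl_map]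
    have hb : (fun (c : Int) (k : Nat) =>
        c + calcularDistancia ((x :: y :: t).getD (k + 1) z) ((x :: y :: t).getD (k + 1 + 1) z))
        = (fun (c : Int) (k : Nat) =>
        c + calcularDistancia ((y :: t).getD k z) ((y :: t).getD (k + 1) z)) := by
      funext c k; simp [List.getD]
    rw [hb, ih y]
    simp only [List.getD, List.getElem?_cons_zero, List.getElem?_cons_succ, Option.getD_some,
      pvPairSum]
    ring

lemma pvPairSum_append_last :
    ∀ (l : List (Int × Int)) (h : l ≠ []) (x : Int × Int),
      pvPairSum (l ++ [x]) = pvPairSum l + calcularDistancia (l.getLast h) x := by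
  intro l
  induction l with
  | nil => intro h; exact absurd rfl h
  | cons a t ih =>
    intro h x
    cases t with
    | nil => simp [pvPairSum]
    | cons b t' =>
      have := ih (by simp) x
      simp only [List.cons_append, pvPairSum] at this ⊢
      rw [List.getLast_cons (by simp), this]
      ring

-- ===== VERDICT (by name: the statement is the Claim_ definition above) =====
theorem calcularCustoTotalDaRota_spec : Claim_equal_calcularCustoTotalDaRota := by
  intro rota pontos _hdom hpre
  obtain ⟨hne, -, -⟩ := hpre
  obtain ⟨s, rest, rfl⟩ : ∃ s rest, rota = s :: rest := by
    cases rota with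
    | nil => exact absurd rfl hne
    | cons s rest => exact ⟨s, rest, rfl⟩
  unfold Spec_calcularCustoTotalDaRota
  set d := PySem.Dict.mk pontos with hd
  set f : String → Int × Int := fun nome => (d.get? nome).getD (0, 0) with hf
  set r : Int × Int := (d.get? "R").getD (0, 0) with hr
  set z : Int × Int := f "" with hz
  show (PySem.List.pyRange 0 (((s :: rest).length : Int) - 1) 1).foldl
      (fun c i => c + calcularDistancia (f (PySem.List.pyGetD (s :: rest) i ""))
           (f (PySem.List.pyGetD (s :: rest) (i + 1) "")))
      ((0 : Int) + calcularDistancia r (f (PySem.List.pyGetD (s :: rest) 0 "")))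
    + calcularDistancia (f (PySem.List.pyGetD (s :: rest) (-1) "")) r
    = somaEixo (([r] ++ (s :: rest).map f ++ [r]).map (fun p => p.1))
      + somaEixo (([r] ++ (s :: rest).map f ++ [r]).map (fun p => p.2))
  rw [pvSplit, PySem.List.pyRange_one]
  have hlen : ((((s :: rest).length : Int)) - 1 - 0).toNat = rest.length := by simp
  rw [hlen, List.foldl_map]
  have hbody : (fun (c : Int) (k : Nat) =>
      c + calcularDistancia (f (PySem.List.pyGetD (s :: rest) ((0 : Int) + (k : Int)) ""))
            (f (PySem.List.pyGetD (s :: rest) ((0 : Int) + (k : Int) + 1) "")))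
      = (fun (c : Int) (k : Nat) =>
      c + calcularDistancia ((f s :: rest.map f).getD k z) ((f s :: rest.map f).getD (k + 1) z)) := by
    funext c k
    have h1 : (0 : Int) + (k : Int) = ((k : Nat) : Int) := by ring
    rw [h1, show ((k : Int) + 1) = (((k + 1 : Nat)) : Int) by push_cast; ring,
      PySem.List.pyGetD_natCast, PySem.List.pyGetD_natCast, hz,
      ← pvGetD_map f "" (s :: rest) k, ← pvGetD_map f "" (s :: rest) (k + 1)]
    simp only [List.map_cons]
  rw [hbody, PySem.List.pyGetD_zero_cons]
  have hlenr : rest.length = (rest.map f).length := by simp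
  rw [hlenr, pvLoop z (rest.map f) (f s)]
  have hneq : s :: rest ≠ [] := by simp
  rw [PySem.List.pyGetD_neg_one (s :: rest) "" hneq]
  have hmapne : (f s :: rest.map f) ≠ [] := by simp
  have hB : pvPairSum ([r] ++ (s :: rest).map f ++ [r])
      = calcularDistancia r (f s) + (pvPairSum (f s :: rest.map f)
          + calcularDistancia ((f s :: rest.map f).getLast hmapne) r) := by
    simp only [List.map_cons, List.cons_append, List.nil_append]
    rw [show pvPairSum (r :: f s :: (rest.map f ++ [r]))
        = calcularDistancia r (f s) + pvPairSum (f s :: (rest.map f ++ [r])) from rfl,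
      show (f s :: (rest.map f ++ [r])) = (f s :: rest.map f) ++ [r] from rfl,
      pvPairSum_append_last (f s :: rest.map f) hmapne r]
  have hgl : (f s :: rest.map f).getLast hmapne = f ((s :: rest).getLast hneq) := by
    have := pvGetLast_map f (s :: rest) hneq (by simp)
    simpa using this
  rw [hB, hgl]
  ring

@[simp]
theorem calcularCustoTotalDaRota_raises : Claim_raises_calcularCustoTotalDaRota := by
  unfold Claim_raises_calcularCustoTotalDaRota
  refine ⟨?_, by decide⟩
  intro rota pontos _ hraises hpre
  exact hpre.1 hraises.1
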